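-- pv_equiv track=rewrite | github.com/Lhy723/ditto-skill | scripts/synthesize_skill.py | render_subskill
-- ===== SOURCE A (Python) =====
-- def render_subskill(title: str, payload: dict[str, object]) -> str:
--     evidence_lines = [f"- {line}" for line in payload.get("evidence_refs", [])]
--     if not evidence_lines:
--         evidence_lines = ["- No explicit evidence refs recorded."]
--     return "\n".join(
--         [
--             f"# {title}",
--             "",
--             "## When to use",
--             *[f"- {line}" for line in payload.get("when_to_use", [])],
--             "",
--             "## What to do",
--             *[f"- {line}" for line in payload.get("what_to_do", [])],
--             "",
--             "## What to avoid",
--             *[f"- {line}" for line in payload.get("what_to_avoid", [])],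
--             "",
--             "## Signals to watch",
--             *[f"- {line}" for line in payload.get("signals_to_watch", [])],
--             "",
--             "## Evidence from source repo",
--             *evidence_lines,
--         ]
--     )
-- ===== SOURCE B (Python) =====
-- def render_subskill(title: str, payload: dict[str, object]) -> str:
--     specs = [
--         ("When to use", "when_to_use"),
--         ("What to do", "what_to_do"),
--         ("What to avoid", "what_to_avoid"),
--         ("Signals to watch", "signals_to_watch"),
--         ("Evidence from source repo", "evidence_refs"),
--     ]
--
--     def render(i: int) -> str:
--         if i == len(specs):
--             return ""
--         heading, key = specs[i]
--         body = "".join(f"\n- {item}" for item in payload.get(key, []))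
--         if key == "evidence_refs" and not body:
--             body = "\n- No explicit evidence refs recorded."
--         return f"\n\n## {heading}{body}" + render(i + 1)
--
--     return f"# {title}" + render(0)
-- ===== Notes on version B (the rewrite author's own statement) =====
-- stated objective: alternative
-- what changed: Instead of assembling a flat list of lines and join('\n')-ing it, B builds the output string directly by concatenation: a recursive function walks a (heading, key) spec list, emitting each section as '\n\n## heading' plus '\n- item' fragments, with the evidence fallback detected as an empty body string rather than an empty line list.
import Mathlib
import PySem

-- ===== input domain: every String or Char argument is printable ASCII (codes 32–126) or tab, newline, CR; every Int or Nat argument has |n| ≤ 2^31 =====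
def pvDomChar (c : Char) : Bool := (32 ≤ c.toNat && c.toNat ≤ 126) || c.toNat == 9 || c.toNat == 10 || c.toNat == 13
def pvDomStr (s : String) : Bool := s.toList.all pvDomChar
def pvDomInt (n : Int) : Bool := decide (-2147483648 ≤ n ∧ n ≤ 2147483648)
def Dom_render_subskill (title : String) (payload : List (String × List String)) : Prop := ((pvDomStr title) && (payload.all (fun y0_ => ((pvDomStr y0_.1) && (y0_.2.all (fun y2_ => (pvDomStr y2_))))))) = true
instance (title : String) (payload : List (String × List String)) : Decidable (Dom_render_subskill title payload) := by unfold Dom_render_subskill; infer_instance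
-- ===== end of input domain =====

-- B builds the output string directly by recursive concatenation over a (heading, key) spec list
-- instead of A's join("\n") of one flat literal line list; objective: alternative (same cost).


-- ===== PORT A =====
def render_subskill (title : String) (payload : List (String × List String)) : String :=
  let evidence_lines := (PySem.Dict.getD (PySem.Dict.mk payload) "evidence_refs" []).map (fun line => "- " ++ line)
  let evidence_lines := if evidence_lines.isEmpty then ["- No explicit evidence refs recorded."] else evidence_lines
  PySem.Str.join "\n"
    (["# " ++ title,
      "",
      "## When to use"] ++
      (PySem.Dict.getD (PySem.Dict.mk payload) "when_to_use" []).map (fun line => "- " ++ line) ++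
     ["",
      "## What to do"] ++
      (PySem.Dict.getD (PySem.Dict.mk payload) "what_to_do" []).map (fun line => "- " ++ line) ++
     ["",
      "## What to avoid"] ++
      (PySem.Dict.getD (PySem.Dict.mk payload) "what_to_avoid" []).map (fun line => "- " ++ line) ++
     ["",
      "## Signals to watch"] ++
      (PySem.Dict.getD (PySem.Dict.mk payload) "signals_to_watch" []).map (fun line => "- " ++ line) ++
     ["",
      "## Evidence from source repo"] ++
      evidence_lines)

-- ===== PORT B =====
-- B: recursion over the spec list, emitting each section as one concatenated string fragment.
def pvSpecs : List (String × String) :=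
  [("When to use", "when_to_use"),
   ("What to do", "what_to_do"),
   ("What to avoid", "what_to_avoid"),
   ("Signals to watch", "signals_to_watch"),
   ("Evidence from source repo", "evidence_refs")]

def pvRenderSections (payload : List (String × List String)) : List (String × String) → String
  | [] => ""
  | (heading, key) :: rest =>
      let body := PySem.Str.join "" ((PySem.Dict.getD (PySem.Dict.mk payload) key []).map (fun item => "\n- " ++ item))
      let body := if key == "evidence_refs" && body == "" then "\n- No explicit evidence refs recorded." else body
      "\n\n## " ++ heading ++ body ++ pvRenderSections payload rest

def render_subskill_alt (title : String) (payload : List (String × List String)) : String :=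
  "# " ++ title ++ pvRenderSections payload pvSpecs

-- ===== PRECONDITION & SPEC =====
def Spec_render_subskill (title : String) (payload : List (String × List String)) (out : String) : Prop := out = render_subskill_alt title payload
instance (title : String) (payload : List (String × List String)) (out : String) : Decidable (Spec_render_subskill title payload out) := by unfold Spec_render_subskill; infer_instance

-- ===== CLAIM (what is proved, stated in full; the proofs are below) =====
def Claim_equal_render_subskill : Prop := ∀ (title : String) (payload : List (String × List String)), Dom_render_subskill title payload → Spec_render_subskill title payload (render_subskill title payload)

-- ===== LEMMAS AND PROOFS =====

theorem pv_chars_join_nil_sep (l : List (List Char)) : PySem.Chars.join [] l = l.flatten := by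
  induction l with
  | nil => rfl
  | cons x l ih =>
    cases l with
    | nil => simp [PySem.Chars.join_singleton]
    | cons y m => simp [PySem.Chars.join_cons_cons] at *; simp [ih]

theorem pv_chars_join_cons (sep x : List Char) (l : List (List Char)) :
    PySem.Chars.join sep (x :: l) = x ++ (l.map (fun s => sep ++ s)).flatten := by
  induction l generalizing x with
  | nil => simp [PySem.Chars.join_singleton]
  | cons y m ih => simp [PySem.Chars.join_cons_cons, ih y]

theorem pv_join_empty_nil : PySem.Str.join "" [] = "" := rfl

theorem pv_join_empty_cons (x : String) (l : List String) :
    PySem.Str.join "" (x :: l) = x ++ PySem.Str.join "" l := by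
  apply String.toList_inj.mp
  simp [PySem.Str.toList_join, pv_chars_join_nil_sep, String.toList_append]

theorem pv_join_empty_append (a b : List String) :
    PySem.Str.join "" (a ++ b) = PySem.Str.join "" a ++ PySem.Str.join "" b := by
  apply String.toList_inj.mp
  simp [PySem.Str.toList_join, pv_chars_join_nil_sep, String.toList_append]

theorem pv_nl_toList : ("\n" : String).toList = ['\n'] := rfl

theorem pv_join_nl (x : String) (l : List String) :
    PySem.Str.join "\n" (x :: l) = x ++ PySem.Str.join "" (l.map (fun s => "\n" ++ s)) := by
  apply String.toList_inj.mp
  simp [PySem.Str.toList_join, pv_chars_join_cons, pv_chars_join_nil_sep, String.toList_append,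
    List.map_map, Function.comp_def, pv_nl_toList]

theorem pv_bullet (s : String) : ("\n" : String) ++ ("- " ++ s) = "\n- " ++ s := by
  rw [← String.append_assoc]
  exact congrArg (· ++ s) (show ("\n" : String) ++ "- " = "\n- " from rfl)

theorem pv_sec1 (r : String) :
    ("\n" : String) ++ ("\n## When to use" ++ r) = "\n\n## When to use" ++ r := by
  rw [← String.append_assoc]
  exact congrArg (· ++ r) (show ("\n" : String) ++ "\n## When to use" = "\n\n## When to use" from rfl)

theorem pv_sec2 (r : String) :
    ("\n" : String) ++ ("\n## What to do" ++ r) = "\n\n## What to do" ++ r := by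
  rw [← String.append_assoc]
  exact congrArg (· ++ r) (show ("\n" : String) ++ "\n## What to do" = "\n\n## What to do" from rfl)

theorem pv_sec3 (r : String) :
    ("\n" : String) ++ ("\n## What to avoid" ++ r) = "\n\n## What to avoid" ++ r := by
  rw [← String.append_assoc]
  exact congrArg (· ++ r) (show ("\n" : String) ++ "\n## What to avoid" = "\n\n## What to avoid" from rfl)

theorem pv_sec4 (r : String) :
    ("\n" : String) ++ ("\n## Signals to watch" ++ r) = "\n\n## Signals to watch" ++ r := by
  rw [← String.append_assoc]
  exact congrArg (· ++ r) (show ("\n" : String) ++ "\n## Signals to watch" = "\n\n## Signals to watch" from rfl)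

theorem pv_sec5 (r : String) :
    ("\n" : String) ++ ("\n## Evidence from source repo" ++ r) = "\n\n## Evidence from source repo" ++ r := by
  rw [← String.append_assoc]
  exact congrArg (· ++ r) (show ("\n" : String) ++ "\n## Evidence from source repo" = "\n\n## Evidence from source repo" from rfl)

-- ===== VERDICT (by name: the statement is the Claim_ definition above) =====
theorem render_subskill_spec : Claim_equal_render_subskill := by
  intro title payload _
  unfold Spec_render_subskill render_subskill render_subskill_alt
  simp only [pvRenderSections, pvSpecs]
  cases hev : PySem.Dict.getD (PySem.Dict.mk payload) "evidence_refs" [] with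
  | nil =>
      simp [List.cons_append, List.map_cons, List.map_append, List.map_map, Function.comp_def,
        pv_join_nl, pv_join_empty_append, pv_join_empty_cons, pv_join_empty_nil,
        pv_bullet, pv_sec1, pv_sec2, pv_sec3, pv_sec4,
        String.append_assoc]
  | cons e es =>
      simp [List.cons_append, List.map_cons, List.map_append, List.map_map, Function.comp_def,
        pv_join_nl, pv_join_empty_append, pv_join_empty_cons,
        pv_bullet, pv_sec1, pv_sec2, pv_sec3, pv_sec4, pv_sec5,
        String.append_assoc]
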